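-- pv_equiv track=rewrite | github.com/hy-cs-16/aligothms | book/이것이-코딩-테스트다-with-python/ch3-greedy/1이-될-때까지.py | solution_in_book
-- ===== SOURCE A (Python) =====
-- def solution_in_book(n, k):
--     result = 0
--
--     while n >= k:
--         while n & k != 0:
--             n -= 1
--             result += 1
--
--         n //= k
--         result += 1
--
--     while n > 1:
--         n -= 1
--         result += 1
--
--     return result
-- ===== SOURCE B (Python) =====
-- def _largest_free(n, k):
--     # largest m <= n with m & k == 0 (assumes n & k != 0, n >= 0):
--     # clear the highest common bit i, keep n's bits above it,
--     # and set every bit below i that k lacks.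
--     c = n & k
--     i = c.bit_length() - 1
--     p = 2 ** (i + 1)
--     half = p // 2
--     low = (half - 1) ^ ((half - 1) & k)
--     return (n // p) * p + low
--
--
-- def solution_in_book(n, k):
--     result = 0
--     while n >= k:
--         if n & k:
--             m = _largest_free(n, k)
--             result += n - m
--             n = m
--         n //= k
--         result += 1
--     if n > 1:
--         result += n - 1
--     return result
-- ===== Notes on version B (the rewrite author's own statement) =====
-- stated objective: faster
-- what changed: Both unit-decrement loops are replaced by closed forms: the inner 'while n & k: n -= 1' becomes one bit-manipulation step that jumps directly to the largest m <= n with m & k == 0 (clear the highest common bit, keep the bits above it, set every lower bit k lacks) adding n - m to the count, and the final 'while n > 1' loop becomes 'result += n - 1'.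
-- outside the precondition, e.g. on solution_in_book(1, 1): A returns 2, B returns 2
import Mathlib
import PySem

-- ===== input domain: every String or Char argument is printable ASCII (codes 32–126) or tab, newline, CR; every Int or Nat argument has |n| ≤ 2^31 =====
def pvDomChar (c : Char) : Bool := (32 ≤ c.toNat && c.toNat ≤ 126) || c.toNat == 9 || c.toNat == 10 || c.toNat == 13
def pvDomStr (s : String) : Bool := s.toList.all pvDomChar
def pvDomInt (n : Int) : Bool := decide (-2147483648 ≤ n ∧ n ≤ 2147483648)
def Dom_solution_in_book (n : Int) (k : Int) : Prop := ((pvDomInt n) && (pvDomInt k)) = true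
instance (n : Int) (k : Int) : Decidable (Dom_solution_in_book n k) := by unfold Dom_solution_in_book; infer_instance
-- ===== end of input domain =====

-- B replaces A's unit-decrement loops by closed forms (one bit-manipulation step per
-- division round, and an arithmetic final count); objective: faster (asymptotic).


-- ===== PORT A =====
-- Python's while-loops are made total with a fuel parameter; on every input admitted by
-- Pre_ the supplied fuel strictly exceeds the number of iterations the Python performs.

-- inner loop: while n & k != 0: n -= 1; result += 1
def innerA (fuel : Nat) (k : Int) (n : Int) (result : Int) : Int × Int :=
  match fuel with
  | 0 => (n, result)
  | f + 1 =>
    if PySem.Int.band n k ≠ 0 then innerA f k (n - 1) (result + 1) else (n, result)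

-- outer loop: while n >= k: <inner loop>; n //= k; result += 1
def outerA (fuel : Nat) (k : Int) (n : Int) (result : Int) : Int × Int :=
  match fuel with
  | 0 => (n, result)
  | f + 1 =>
    if k ≤ n then
      let p := innerA (n.toNat + 1) k n result
      outerA f k (PySem.Int.floordiv p.1 k) (p.2 + 1)
    else (n, result)

-- final loop: while n > 1: n -= 1; result += 1
def finalA (n : Int) (result : Int) : Int :=
  if 1 < n then finalA (n - 1) (result + 1) else result
termination_by n.toNat
decreasing_by omega

def solution_in_book (n : Int) (k : Int) : Int :=
  let p := outerA (n.toNat + 1) k n 0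
  finalA p.1 p.2

-- ===== PORT B =====
-- helper _largest_free: largest m <= n with m & k == 0 (n & k != 0, n >= 0)
def largestFree (n : Int) (k : Int) : Int :=
  let c := PySem.Int.band n k
  let i := PySem.Int.bitLength c - 1
  let p : Int := 2 ^ (i + 1)
  let half := PySem.Int.floordiv p 2
  let low := PySem.Int.bxor (half - 1) (PySem.Int.band (half - 1) k)
  PySem.Int.floordiv n p * p + low

-- B's single loop (fuel only makes the while-loop total, as for port A)
def altGo (fuel : Nat) (k : Int) (n : Int) (result : Int) : Int × Int :=
  match fuel with
  | 0 => (n, result)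
  | f + 1 =>
    if k ≤ n then
      let s :=
        if PySem.Int.band n k ≠ 0 then
          let m := largestFree n k
          (m, result + (n - m))
        else (n, result)
      altGo f k (PySem.Int.floordiv s.1 k) (s.2 + 1)
    else (n, result)

def solution_in_book_alt (n : Int) (k : Int) : Int :=
  let p := altGo (n.toNat + 1) k n 0
  if 1 < p.1 then p.2 + (p.1 - 1) else p.2

-- ===== PRECONDITION & SPEC =====
-- Pre_ excludes k ≤ 1 whenever the main loop is reachable: there A loops forever
-- (k = 1 with n ≥ 2, or k ≤ 0 with n ≥ k) or raises ZeroDivisionError (k = 0, n ≥ 0);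
-- the lone returning point (n,k) = (1,1) is excluded with it for the carve-out's uniformity.
def Pre_solution_in_book (n : Int) (k : Int) : Prop := 2 ≤ k ∨ (k ≤ 1 ∧ n ≤ 0 ∧ n < k)
instance (n : Int) (k : Int) : Decidable (Pre_solution_in_book n k) := by
  unfold Pre_solution_in_book; infer_instance

def pvWitness_solution_in_book : Int × Int := (27, 3)

def Spec_solution_in_book (n : Int) (k : Int) (out : Int) : Prop := out = solution_in_book_alt n k
instance (n : Int) (k : Int) (out : Int) : Decidable (Spec_solution_in_book n k out) := by
  unfold Spec_solution_in_book; infer_instance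

-- ===== CLAIM (what is proved, stated in full; the proofs are below) =====
def Claim_equal_solution_in_book : Prop := ∀ (n : Int) (k : Int), Dom_solution_in_book n k → Pre_solution_in_book n k → Spec_solution_in_book n k (solution_in_book n k)

-- ===== LEMMAS AND PROOFS =====

-- The bit-manipulation step of B computes the value A's inner decrement loop stops at:
-- the largest M < N with M &&& K = 0 (it exists and is < N since N &&& K ≠ 0).
lemma largestFree_natCast (N K : Nat) (hc : N &&& K ≠ 0) :
    ∃ M : Nat,
      largestFree (N : Int) (K : Int) = (M : Int) ∧
      M &&& K = 0 ∧ M < N ∧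
      ∀ j : Nat, M < j → j ≤ N → j &&& K ≠ 0 := by
  set C := N &&& K with hCdef
  set b := PySem.Int.bitLength (C : Int) with hbdef
  have hC1 : 1 ≤ C := Nat.one_le_iff_ne_zero.mpr hc
  have hCne : (C : Int) ≠ 0 := by exact_mod_cast hc
  have hCub : C < 2 ^ b := by
    have := PySem.Int.lt_two_pow_bitLength (C : Int)
    simpa using this
  have hb1 : 1 ≤ b := by
    by_contra h
    have hb0 : b = 0 := by omega
    rw [hb0, pow_zero] at hCub; omega
  set i := b - 1 with hidef
  have hs : b = i + 1 := by omega
  have hClb : 2 ^ i ≤ C := by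
    have := PySem.Int.two_pow_bitLength_le (C : Int) hCne
    simpa [hidef] using this
  have h2i : 1 ≤ 2 ^ i := Nat.one_le_two_pow
  have h2s : 0 < 2 ^ (i + 1) := by positivity
  set L := (2 ^ i - 1) ^^^ ((2 ^ i - 1) &&& K) with hLdef
  set Q := N / 2 ^ (i + 1) with hQdef
  set M := Q * 2 ^ (i + 1) + L with hMdef
  have hCbiti : C.testBit i = true := by
    have hdiv1 : C / 2 ^ i = 1 := by
      have hle : 1 ≤ C / 2 ^ i := (Nat.le_div_iff_mul_le (by positivity)).mpr (by omega)
      have hlt : C / 2 ^ i < 2 := by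
        rw [Nat.div_lt_iff_lt_mul (by positivity)]
        calc C < 2 ^ b := hCub
        _ = 2 ^ i * 2 := by rw [hs, pow_succ]
        _ = 2 * 2 ^ i := by ring
      omega
    rw [Nat.testBit_eq_decide_div_mod_eq, hdiv1]
    rfl
  have hCbit_hi : ∀ j, i < j → C.testBit j = false := by
    intro j hj
    exact Nat.testBit_eq_false_of_lt
      (lt_of_lt_of_le hCub (Nat.pow_le_pow_right (by norm_num) (by omega)))
  have hNK : N.testBit i = true ∧ K.testBit i = true := by
    have h := hCbiti
    rw [hCdef, Nat.testBit_land] at h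
    constructor
    · cases hN : N.testBit i <;> simp [hN] at h ⊢
    · cases hK : K.testBit i <;> simp [hK] at h ⊢
  have hLbit : ∀ j, L.testBit j = (decide (j < i) && !(K.testBit j)) := by
    intro j
    simp only [hLdef, Nat.testBit_xor, Nat.testBit_land, Nat.testBit_two_pow_sub_one]
    cases hd : decide (j < i) <;> cases hk2 : K.testBit j <;> rfl
  have hLlt : L < 2 ^ i := by
    have hsub : L &&& (2 ^ i - 1) = L := by
      apply Nat.eq_of_testBit_eq
      intro j
      rw [Nat.testBit_land, hLbit, Nat.testBit_two_pow_sub_one]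
      cases hd : decide (j < i) <;> cases hk2 : K.testBit j <;> rfl
    calc L = L &&& (2 ^ i - 1) := hsub.symm
      _ ≤ 2 ^ i - 1 := Nat.and_le_right
      _ < 2 ^ i := by omega
  have hLs : L < 2 ^ (i + 1) := lt_of_lt_of_le hLlt (Nat.pow_le_pow_right (by norm_num) (by omega))
  have hMmod : M % 2 ^ (i + 1) = L := by
    rw [hMdef, Nat.mul_comm Q, Nat.mul_add_mod]
    exact Nat.mod_eq_of_lt hLs
  have hMdiv : M / 2 ^ (i + 1) = Q := by
    rw [hMdef, Nat.mul_comm Q, Nat.mul_add_div h2s]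
    rw [Nat.div_eq_of_lt hLs, Nat.add_zero]
  have hMbit_lo : ∀ j, j < i + 1 → M.testBit j = L.testBit j := by
    intro j hj
    have h := Nat.testBit_mod_two_pow M (i + 1) j
    rw [hMmod] at h
    simp [hj] at h
    exact h.symm
  have hMbit_hi : ∀ j, i + 1 ≤ j → M.testBit j = N.testBit j := by
    intro j hj
    obtain ⟨d, rfl⟩ : ∃ d, j = d + (i + 1) := ⟨j - (i + 1), by omega⟩
    rw [← Nat.testBit_div_two_pow M d, ← Nat.testBit_div_two_pow N d, hMdiv, hQdef]
  have hMK : M &&& K = 0 := by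
    apply Nat.eq_of_testBit_eq
    intro j
    rw [Nat.testBit_land, Nat.zero_testBit]
    by_cases hj : j < i + 1
    · rw [hMbit_lo j hj, hLbit]
      by_cases hji : j < i
      · simp [hji]
      · simp [hji]
    · rw [hMbit_hi j (by omega)]
      have h0 := hCbit_hi j (by omega)
      rw [hCdef, Nat.testBit_land] at h0
      exact h0
  have hMN : M < N := by
    apply Nat.lt_of_testBit i
    · rw [hMbit_lo i (by omega), hLbit]; simp
    · exact hNK.1
    · intro j hj
      exact hMbit_hi j (by omega)
  refine ⟨M, ?_, hMK, hMN, ?_⟩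
  · -- evaluation of largestFree
    unfold largestFree
    simp only [PySem.Int.band_natCast, ← hCdef, ← hbdef, ← hidef]
    have e1 : ((2 : Int) ^ (i + 1)) = ((2 ^ (i + 1) : Nat) : Int) := by push_cast; ring
    have e2 : PySem.Int.floordiv ((2 ^ (i + 1) : Nat) : Int) 2 = ((2 ^ i : Nat) : Int) := by
      have h22 : ((2 : Int)) = ((2 : Nat) : Int) := rfl
      rw [h22, PySem.Int.floordiv_natCast]
      congr 1
      rw [pow_succ]
      exact Nat.mul_div_cancel _ (by norm_num)
    rw [e1, e2]
    have e3 : ((2 ^ i : Nat) : Int) - 1 = ((2 ^ i - 1 : Nat) : Int) := by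
      push_cast [h2i]; ring
    rw [e3, PySem.Int.band_natCast, PySem.Int.bxor_natCast, PySem.Int.floordiv_natCast]
    rw [← hLdef, ← hQdef, hMdef]
    push_cast
    ring
  · -- maximality
    intro m' h1 h2 h0
    have hm'i : m'.testBit i = false := by
      have h := congrArg (fun t => Nat.testBit t i) h0
      simp only [Nat.testBit_land, Nat.zero_testBit] at h
      rw [hNK.2] at h
      simpa using h
    set v := m' % 2 ^ (i + 1) with hvdef
    have hvlt : v < 2 ^ (i + 1) := Nat.mod_lt _ h2s
    have hvbit : ∀ j, v.testBit j = (decide (j < i + 1) && m'.testBit j) :=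
      fun j => Nat.testBit_mod_two_pow m' (i + 1) j
    have hvi : v.testBit i = false := by rw [hvbit]; simp [hm'i]
    have hv2i : v < 2 ^ i := by
      by_contra hge
      push Not at hge
      have hdiv1 : v / 2 ^ i = 1 := by
        have hle : 1 ≤ v / 2 ^ i := (Nat.le_div_iff_mul_le (by positivity)).mpr (by omega)
        have hlt : v / 2 ^ i < 2 := by
          rw [Nat.div_lt_iff_lt_mul (by positivity)]
          calc v < 2 ^ (i + 1) := hvlt
          _ = 2 * 2 ^ i := by rw [pow_succ]; ring
        omega
      have hbad : v.testBit i = true := by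
        rw [Nat.testBit_eq_decide_div_mod_eq, hdiv1]; rfl
      simp [hvi] at hbad
    have hvL : v ≤ L := by
      have hsub : v &&& L = v := by
        apply Nat.eq_of_testBit_eq
        intro j
        rw [Nat.testBit_land, hLbit]
        by_cases hvj : v.testBit j = true
        · have hji : j < i := by
            by_contra hge
            push Not at hge
            have hf : v.testBit j = false :=
              Nat.testBit_eq_false_of_lt
                (lt_of_lt_of_le hv2i (Nat.pow_le_pow_right (by norm_num) hge))
            simp [hf] at hvj
          have hmj : m'.testBit j = true := by
            have h := hvbit j
            rw [hvj] at h
            have hjs : j < i + 1 := by omega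
            simp [hjs] at h
            exact h
          have hkj : K.testBit j = false := by
            have h := congrArg (fun t => Nat.testBit t j) h0
            simp only [Nat.testBit_land, Nat.zero_testBit] at h
            rw [hmj] at h
            simpa using h
          simp [hvj, hji, hkj]
        · simp only [Bool.not_eq_true] at hvj
          simp [hvj]
      calc v = v &&& L := hsub.symm
        _ ≤ L := Nat.and_le_right
    have hdm := Nat.div_add_mod m' (2 ^ (i + 1))
    have hdN := Nat.div_add_mod N (2 ^ (i + 1))
    have hNmod : N % 2 ^ (i + 1) < 2 ^ (i + 1) := Nat.mod_lt _ h2s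
    set q' := m' / 2 ^ (i + 1) with hq'def
    have h3 : 2 ^ (i + 1) * Q = Q * 2 ^ (i + 1) := by ring
    rcases lt_trichotomy q' Q with hqq | hqq | hqq
    · have hm1 : 2 ^ (i + 1) * (q' + 1) ≤ 2 ^ (i + 1) * Q :=
        Nat.mul_le_mul_left _ (by omega)
      have hexp : 2 ^ (i + 1) * (q' + 1) = 2 ^ (i + 1) * q' + 2 ^ (i + 1) := by ring
      omega
    · rw [hqq] at hdm
      omega
    · have hm1 : 2 ^ (i + 1) * (Q + 1) ≤ 2 ^ (i + 1) * q' :=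
        Nat.mul_le_mul_left _ (by omega)
      have hcon : N < m' := by
        calc N = 2 ^ (i + 1) * Q + N % 2 ^ (i + 1) := hdN.symm
        _ < 2 ^ (i + 1) * Q + 2 ^ (i + 1) := by omega
        _ = 2 ^ (i + 1) * (Q + 1) := by ring
        _ ≤ 2 ^ (i + 1) * q' := hm1
        _ ≤ 2 ^ (i + 1) * q' + v := Nat.le_add_right _ _
        _ = m' := hdm
      omega

-- A's inner loop, given enough fuel, stops exactly at the largest band-free value below n.
lemma innerA_eq (k m : Int) (hm0 : 0 ≤ m) (hmb : PySem.Int.band m k = 0) :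
    ∀ (f : Nat) (n r : Int), m ≤ n → (n - m).toNat < f →
      (∀ j : Int, m < j → j ≤ n → PySem.Int.band j k ≠ 0) →
      innerA f k n r = (m, r + (n - m)) := by
  intro f
  induction f with
  | zero => intro n r _ h _; exact absurd h (Nat.not_lt_zero _)
  | succ f ih =>
    intro n r hmn hf hmax
    by_cases heq : n = m
    · subst heq
      simp only [innerA, hmb, ne_eq, not_true_eq_false, if_false]
      simp
    · have hlt : m < n := lt_of_le_of_ne hmn (Ne.symm heq)
      have hbn : PySem.Int.band n k ≠ 0 := hmax n hlt le_rfl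
      rw [innerA.eq_def]
      simp only [if_pos hbn]
      rw [ih (n - 1) (r + 1) (by omega) (by omega) (fun j hj1 hj2 => hmax j hj1 (by omega))]
      refine Prod.ext rfl ?_
      simp only
      ring

-- the two loops stay synchronized: same state after each division round
lemma go_eq (f : Nat) : ∀ (k n r : Int), 2 ≤ k → outerA f k n r = altGo f k n r := by
  induction f with
  | zero => intro k n r _; rfl
  | succ f ih =>
    intro k n r hk
    by_cases hkn : k ≤ n
    · have hn0 : 0 ≤ n := le_trans (by omega) hkn
      obtain ⟨N, rfl⟩ : ∃ N : Nat, n = (N : Int) := ⟨n.toNat, (Int.toNat_of_nonneg hn0).symm⟩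
      obtain ⟨K, rfl⟩ : ∃ K : Nat, k = (K : Int) :=
        ⟨k.toNat, (Int.toNat_of_nonneg (by omega)).symm⟩
      have htn : ((N : Int)).toNat = N := by omega
      by_cases hb : N &&& K = 0
      · -- no common bits: the inner loop does not move, B's branch is skipped
        have hbz : PySem.Int.band (N : Int) (K : Int) = 0 := by
          rw [PySem.Int.band_natCast, hb]; rfl
        rw [outerA, altGo, if_pos hkn, if_pos hkn]
        simp only [htn]
        have hin : innerA (N + 1) (K : Int) (N : Int) r = ((N : Int), r) := by
          rw [innerA.eq_def]
          simp [hbz]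
        rw [hin]
        simp only [hbz, ne_eq, not_true_eq_false, if_false]
        exact ih (K : Int) (PySem.Int.floordiv (N : Int) (K : Int)) (r + 1) hk
      · obtain ⟨M, hMeval, hMK, hMN, hMmax⟩ := largestFree_natCast N K hb
        have hbz : PySem.Int.band (N : Int) (K : Int) ≠ 0 := by
          rw [PySem.Int.band_natCast]
          exact_mod_cast hb
        have hin : innerA (N + 1) (K : Int) (N : Int) r = ((M : Int), r + ((N : Int) - (M : Int))) := by
          apply innerA_eq (K : Int) (M : Int) (by positivity)
            (by rw [PySem.Int.band_natCast, hMK]; rfl)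
          · exact_mod_cast hMN.le
          · omega
          · intro j hj1 hj2
            obtain ⟨J, rfl⟩ : ∃ J : Nat, j = (J : Int) :=
              ⟨j.toNat, (Int.toNat_of_nonneg (by omega)).symm⟩
            rw [PySem.Int.band_natCast]
            have : J &&& K ≠ 0 := hMmax J (by exact_mod_cast hj1) (by exact_mod_cast hj2)
            exact_mod_cast this
        rw [outerA, altGo, if_pos hkn, if_pos hkn]
        simp only [htn, hin, hbz, ne_eq, not_false_eq_true, if_true, hMeval]
        exact ih (K : Int) (PySem.Int.floordiv (M : Int) (K : Int)) (r + ((N : Int) - (M : Int)) + 1) hk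
    · rw [outerA, altGo, if_neg hkn, if_neg hkn]

-- A's final decrement loop in closed form
lemma finalA_eq (n r : Int) : finalA n r = if 1 < n then r + (n - 1) else r := by
  have H : ∀ (t : Nat) (n r : Int), n.toNat ≤ t → finalA n r = if 1 < n then r + (n - 1) else r := by
    intro t
    induction t with
    | zero =>
      intro n r h
      have hn : ¬ 1 < n := by omega
      rw [finalA, if_neg hn, if_neg hn]
    | succ t ih =>
      intro n r h
      by_cases hn : 1 < n
      · rw [finalA, if_pos hn, ih (n - 1) (r + 1) (by omega), if_pos hn]
        by_cases h2 : 1 < n - 1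
        · rw [if_pos h2]; ring
        · rw [if_neg h2]; omega
      · rw [finalA, if_neg hn, if_neg hn]
  exact H n.toNat n r le_rfl

-- ===== VERDICT (by name: the statement is the Claim_ definition above) =====
theorem solution_in_book_spec : Claim_equal_solution_in_book := by
  unfold Claim_equal_solution_in_book
  intro n k _ hpre
  unfold Spec_solution_in_book
  rcases hpre with hk | ⟨hk1, hn0, hnk⟩
  · unfold solution_in_book solution_in_book_alt
    rw [go_eq _ _ _ _ hk, finalA_eq]
  · have ht : n.toNat = 0 := by omega
    have hguard : ¬ k ≤ n := by omega
    unfold solution_in_book solution_in_book_alt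
    rw [ht]
    simp only [outerA, altGo, if_neg hguard]
    rw [finalA_eq]
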